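-- pv_equiv track=rewrite | github.com/Ulises-Rosas/getGene | src/getGenomes.py | filtercounter
-- ===== SOURCE A (Python) =====
-- def filtercounter(mydict, counterspps):
--
--     idx = []
--     for n,val in enumerate(mydict['Organism_Name']):
--         if not val in counterspps:
--             idx.append(n)
--
--     out = {}
--     for k,v in mydict.items():
--         out[k] = [ v[i] for i in idx ]
--
--     return out
-- ===== SOURCE B (Python) =====
-- def filtercounter(mydict, counterspps):
--     out = {k: [] for k in mydict}
--     for i, val in enumerate(mydict['Organism_Name']):
--         if val not in counterspps:
--             for k in out:
--                 out[k].append(mydict[k][i])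
--     return out
-- ===== Notes on version B (the rewrite author's own statement) =====
-- stated objective: simpler
-- what changed: B drops A's intermediate index list and two-phase build (collect surviving indices, then gather per column): it pre-initializes every key with an empty list and does one direct accumulating pass over the organism column, appending the i-th entry of every column whenever the organism survives. Pre_ excludes only inputs where A raises (missing 'Organism_Name' key -> KeyError, a surviving index beyond a column's length -> IndexError) and association lists with duplicate keys, which cannot arise from a real Python dict.
import Mathlib
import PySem

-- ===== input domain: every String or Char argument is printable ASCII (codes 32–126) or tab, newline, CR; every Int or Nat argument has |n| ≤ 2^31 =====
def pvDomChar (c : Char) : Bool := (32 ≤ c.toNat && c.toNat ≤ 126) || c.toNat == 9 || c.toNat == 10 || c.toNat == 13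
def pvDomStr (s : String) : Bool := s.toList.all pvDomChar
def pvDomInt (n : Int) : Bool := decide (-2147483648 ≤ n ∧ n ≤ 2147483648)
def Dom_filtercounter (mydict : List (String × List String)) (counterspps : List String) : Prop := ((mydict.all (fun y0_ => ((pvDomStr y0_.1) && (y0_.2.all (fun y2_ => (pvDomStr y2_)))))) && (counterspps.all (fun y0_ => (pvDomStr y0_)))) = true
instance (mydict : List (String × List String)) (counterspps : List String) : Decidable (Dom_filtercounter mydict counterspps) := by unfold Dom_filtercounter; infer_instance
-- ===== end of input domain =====

-- B replaces A's two-phase build (index list, then per-column gather) by one accumulating pass over pre-initialized columns; simpler decomposition, same cost.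


-- ===== PORT A =====
def filtercounter (mydict : List (String × List String)) (counterspps : List String) : List (String × List String) :=
  let org := ((PySem.Dict.mk mydict).get? "Organism_Name").getD []    -- mydict['Organism_Name']; KeyError (→ outside Pre_) if absent
  let idx := (PySem.List.enumerate org).foldl
    (fun (acc : List Int) p => if p.2 ∉ counterspps then acc ++ [p.1] else acc) []
  let out := mydict.foldl
    (fun (o : PySem.Dict String (List String)) kv =>
      o.insert kv.1 (idx.map (fun i => (PySem.List.pyGet? kv.2 i).getD "")))   -- v[i]; IndexError (→ outside Pre_) if out of range
    PySem.Dict.empty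
  out.items

-- ===== PORT B =====
def filtercounter_alt (mydict : List (String × List String)) (counterspps : List String) : List (String × List String) :=
  let d := PySem.Dict.mk mydict
  let out0 := mydict.foldl (fun (o : PySem.Dict String (List String)) kv => o.insert kv.1 []) PySem.Dict.empty
  let org := (d.get? "Organism_Name").getD []
  let out := (PySem.List.enumerate org).foldl
    (fun (o : PySem.Dict String (List String)) p =>
      if p.2 ∉ counterspps then
        -- for k in out: out[k].append(mydict[k][i])  (every key of out is touched, order kept)
        PySem.Dict.mk (o.items.map (fun kv => (kv.1, kv.2 ++ [(PySem.List.pyGet? ((d.get? kv.1).getD []) p.1).getD ""])))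
      else o)
    out0
  out.items

-- ===== PRECONDITION & SPEC =====
-- Pre_ excludes exactly the inputs where A raises (no 'Organism_Name' key → KeyError; a surviving index
-- beyond a column's length → IndexError) and association lists with duplicate keys, which cannot arise
-- from a Python dict (both ports' Dict semantics would collapse them in different accidental ways).
def Pre_filtercounter (mydict : List (String × List String)) (counterspps : List String) : Prop :=
  (mydict.map Prod.fst).Nodup ∧
  ((PySem.Dict.mk mydict).get? "Organism_Name").isSome ∧
  ∀ kv ∈ mydict, ∀ i : Fin (((PySem.Dict.mk mydict).get? "Organism_Name").getD []).length,
    (((PySem.Dict.mk mydict).get? "Organism_Name").getD [])[i] ∉ counterspps → (i : Nat) < kv.2.length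
instance (mydict : List (String × List String)) (counterspps : List String) : Decidable (Pre_filtercounter mydict counterspps) := by unfold Pre_filtercounter; infer_instance

def pvWitness_filtercounter : (List (String × List String)) × List String :=
  ([("Organism_Name", ["ant", "bee"]), ("Id", ["1", "2"])], ["bee"])

def Spec_filtercounter (mydict : List (String × List String)) (counterspps : List String) (out : List (String × List String)) : Prop := out = filtercounter_alt mydict counterspps
instance (mydict : List (String × List String)) (counterspps : List String) (out : List (String × List String)) : Decidable (Spec_filtercounter mydict counterspps out) := by unfold Spec_filtercounter; infer_instance

-- ===== CLAIM (what is proved, stated in full; the proofs are below) =====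
def Claim_equal_filtercounter : Prop := ∀ (mydict : List (String × List String)) (counterspps : List String), Dom_filtercounter mydict counterspps → Pre_filtercounter mydict counterspps → Spec_filtercounter mydict counterspps (filtercounter mydict counterspps)

-- ===== LEMMAS AND PROOFS =====

-- A's index-building loop is filter-then-project.
theorem pv_idx_eq (cs : List String) (ps : List (Int × String)) (acc : List Int) :
    ps.foldl (fun (acc : List Int) p => if p.2 ∉ cs then acc ++ [p.1] else acc) acc
      = acc ++ (ps.filter (fun p => decide (p.2 ∉ cs))).map Prod.fst := by
  induction ps generalizing acc with
  | nil => simp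
  | cons p ps ih =>
    rw [List.foldl_cons]
    by_cases h : p.2 ∉ cs
    · rw [if_pos h, ih]
      simp [h, List.append_assoc]
    · rw [if_neg h, ih]
      simp [h]

-- A's output loop over fresh distinct keys appends entry by entry.
theorem pv_foldA (f : String × List String → List String) (l : List (String × List String))
    (hnd : (l.map Prod.fst).Nodup) :
    (l.foldl (fun (o : PySem.Dict String (List String)) kv => o.insert kv.1 (f kv)) PySem.Dict.empty).items
      = l.map (fun kv => (kv.1, f kv)) := by
  have := PySem.Dict.items_foldl_insert_fresh (l := l) (k := Prod.fst) (v := f)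
    (d := PySem.Dict.empty) (by intro a _; rfl) hnd
  simpa [PySem.Dict.empty] using this

-- B's accumulating pass extends every column by the surviving entries.
theorem pv_foldB (cs : List String) (g : String → Int → String)
    (ps : List (Int × String)) (L : List (String × List String)) :
    (ps.foldl
      (fun (o : PySem.Dict String (List String)) p =>
        if p.2 ∉ cs then
          PySem.Dict.mk (o.items.map (fun kv => (kv.1, kv.2 ++ [g kv.1 p.1])))
        else o)
      (PySem.Dict.mk L)).items
      = L.map (fun kv => (kv.1, kv.2 ++ (ps.filter (fun p => decide (p.2 ∉ cs))).map (fun p => g kv.1 p.1))) := by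
  induction ps generalizing L with
  | nil => simp
  | cons p ps ih =>
    by_cases h : p.2 ∉ cs
    · rw [List.foldl_cons, if_pos h]
      have : (PySem.Dict.mk L).items = L := rfl
      rw [this, ih (L.map (fun kv => (kv.1, kv.2 ++ [g kv.1 p.1])))]
      simp [List.map_map, Function.comp, h, List.append_assoc]
    · rw [List.foldl_cons, if_neg h, ih]
      simp [h]

-- With unique keys, lookup of a member pair returns its own column.
theorem pv_lookup (l : List (String × List String)) (kv : String × List String)
    (hmem : kv ∈ l) (hnd : (l.map Prod.fst).Nodup) :
    (PySem.Dict.mk l).get? kv.1 = some kv.2 := by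
  apply PySem.Dict.get?_of_mem_items
  · exact hmem
  · exact hnd

-- ===== VERDICT (by name: the statement is the Claim_ definition above) =====
theorem filtercounter_spec : Claim_equal_filtercounter := by
  intro mydict counterspps _ hpre
  obtain ⟨hnd, -, -⟩ := hpre
  show filtercounter mydict counterspps = filtercounter_alt mydict counterspps
  simp only [filtercounter, filtercounter_alt]
  have h0 : (mydict.foldl (fun (o : PySem.Dict String (List String)) kv => o.insert kv.1 []) PySem.Dict.empty)
      = PySem.Dict.mk (mydict.map (fun kv => (kv.1, ([] : List String)))) :=
    PySem.Dict.ext (pv_foldA (fun _ => []) mydict hnd)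
  rw [pv_idx_eq, pv_foldA _ _ hnd, h0, pv_foldB counterspps (fun k i => (PySem.List.pyGet? (((PySem.Dict.mk mydict).get? k).getD []) i).getD ""), List.map_map]
  apply List.map_congr_left
  intro kv hmem
  have hl := pv_lookup mydict kv hmem hnd
  simp [hl, List.map_map, Function.comp]
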